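-- pv_equiv track=rewrite | github.com/AP-MI-2021/lab-3-biaanton | main.py | get_longest_arithmetic_progression
-- ===== SOURCE A (Python) =====
-- from typing import List
--
-- def get_progresie_aritmetica(lst: List[int])->List[int]:
--         '''
--         Verifica daca elementele din lista sunt in progresie aritmetica
--         :param lst: lista din care verificam numerele
--         :return: valoarea 1 daca elementele din lista sunt in progresie aritmetica, respectiv 0 in caz contrar
--         '''
--         n=len(lst)
--         for i in range (1,n-1):
--                 if lst[i]!= (lst[i-1]+lst[i+1])/2: return 0
--         return 1
--
-- def get_longest_arithmetic_progression(lst: List[int]) -> List[int]: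
--         '''
--         Determina cea mai lunga subsecventa cu proprietatea ca toate numerele sunt in progresie aritmetica
--         :param lst: lista in care cautam subsecventa
--         :return: returnam subsecventa dorita
--         '''
--         n = len(lst)
--         lista=[]
--         result = []
--         for left in range(0,n-2):
--                 for right in range(left+3, n+1):
--                         if get_progresie_aritmetica(lst[left:right])== 1:
--                                 lista.append(lst[left:right])
--         for num in lista:
--                 if(len(num)>len(result)):
--                         result= num
--         return result
-- ===== SOURCE B (Python) =====
-- from typing import List
--
-- def get_longest_arithmetic_progression(lst: List[int]) -> List[int]:
--     n = len(lst)
--     best_start, best_len = 0, 0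
--     run_start = 0
--     for i in range(1, n):
--         if i >= 2 and lst[i] - lst[i - 1] != lst[i - 1] - lst[i - 2]:
--             run_start = i - 1
--         cur_len = i - run_start + 1
--         if cur_len >= 3 and cur_len > best_len:
--             best_start, best_len = run_start, cur_len
--     return lst[best_start:best_start + best_len]
-- ===== Notes on version B (the rewrite author's own statement) =====
-- stated objective: faster
-- what changed: Replaced the O(n^3)-slice brute force (enumerate every subarray of length >= 3, test each for being an arithmetic progression, then scan the collected list for the first longest) by a single left-to-right pass that tracks the current run of equal consecutive differences and keeps the leftmost longest run of length >= 3.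
import Mathlib
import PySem

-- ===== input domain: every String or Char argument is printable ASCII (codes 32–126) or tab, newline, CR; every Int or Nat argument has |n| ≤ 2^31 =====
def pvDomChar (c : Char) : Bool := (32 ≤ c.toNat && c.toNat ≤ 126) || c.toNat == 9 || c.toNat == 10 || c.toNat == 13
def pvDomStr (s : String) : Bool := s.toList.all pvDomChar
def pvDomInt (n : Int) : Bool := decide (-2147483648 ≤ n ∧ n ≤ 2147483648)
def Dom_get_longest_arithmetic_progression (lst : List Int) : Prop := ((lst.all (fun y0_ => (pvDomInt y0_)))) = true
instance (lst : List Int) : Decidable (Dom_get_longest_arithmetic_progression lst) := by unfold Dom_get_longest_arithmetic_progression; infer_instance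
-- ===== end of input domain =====

-- B replaces A's O(n^3) enumerate-all-subarrays search by one linear pass over runs of
-- equal consecutive differences, keeping the leftmost longest run of length >= 3 (faster, asymptotic).

-- ===== PORT A =====
-- Python's test 'lst[i] != (lst[i-1]+lst[i+1])/2' is float-exact on the stated domain
-- (|lst[i-1]+lst[i+1]| ≤ 2^32 < 2^53 and int-vs-float comparison is exact in Python),
-- hence ported as the equivalent integer condition 2*lst[i] ≠ lst[i-1]+lst[i+1].
-- The early-return 'for … if cond: return 0 / return 1' loop is ported as '.all'.
def get_progresie_aritmetica (lst : List Int) : Int :=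
  let n : Int := (lst.length : Int)
  if (PySem.List.pyRange 1 (n-1) 1).all
      (fun i => 2 * PySem.List.pyGetD lst i 0
                  == PySem.List.pyGetD lst (i-1) 0 + PySem.List.pyGetD lst (i+1) 0)
  then 1 else 0

def get_longest_arithmetic_progression (lst : List Int) : List Int :=
  let n : Int := (lst.length : Int)
  let lista : List (List Int) :=
    (PySem.List.pyRange 0 (n-2) 1).foldl (fun lista left =>
      (PySem.List.pyRange (left+3) (n+1) 1).foldl (fun lista right =>
        if get_progresie_aritmetica (PySem.List.slice lst (some left) (some right)) == 1
        then lista ++ [PySem.List.slice lst (some left) (some right)]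
        else lista) lista) []
  lista.foldl (fun result num => if result.length < num.length then num else result) []

-- ===== PORT B =====
-- state: ((best_start, best_len), run_start)
def get_longest_arithmetic_progression_alt (lst : List Int) : List Int :=
  let n : Int := (lst.length : Int)
  let st : (Int × Int) × Int :=
    (PySem.List.pyRange 1 n 1).foldl
      (fun st i =>
        let run_start : Int :=
          if 2 ≤ i ∧ PySem.List.pyGetD lst i 0 - PySem.List.pyGetD lst (i-1) 0
                     ≠ PySem.List.pyGetD lst (i-1) 0 - PySem.List.pyGetD lst (i-2) 0
          then i - 1 else st.2
        let cur_len : Int := i - run_start + 1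
        let best : Int × Int :=
          if 3 ≤ cur_len ∧ st.1.2 < cur_len then (run_start, cur_len) else st.1
        (best, run_start))
      ((0, 0), 0)
  PySem.List.slice lst (some st.1.1) (some (st.1.1 + st.1.2))

-- ===== PRECONDITION & SPEC =====
def Spec_get_longest_arithmetic_progression (lst : List Int) (out : List Int) : Prop := out = get_longest_arithmetic_progression_alt lst
instance (lst : List Int) (out : List Int) : Decidable (Spec_get_longest_arithmetic_progression lst out) := by unfold Spec_get_longest_arithmetic_progression; infer_instance

-- ===== CLAIM (what is proved, stated in full; the proofs are below) =====
def Claim_equal_get_longest_arithmetic_progression : Prop := ∀ (lst : List Int), Dom_get_longest_arithmetic_progression lst → Spec_get_longest_arithmetic_progression lst (get_longest_arithmetic_progression lst)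

-- ===== LEMMAS AND PROOFS =====

-- absolute-index access and the difference sequence
def gI (lst : List Int) (k : Int) : Int := PySem.List.pyGetD lst k 0
def dd (lst : List Int) (k : Int) : Int := gI lst (k+1) - gI lst k
-- lst[l:r] is an arithmetic progression (constant consecutive difference), stated on absolute indices
def APi (lst : List Int) (l r : Int) : Prop := ∀ k : Int, l < k → k + 1 < r → dd lst (k-1) = dd lst k

theorem APi_mono {lst : List Int} {l r l' r' : Int} (h : APi lst l r)
    (hl : l ≤ l') (hr : r' ≤ r) : APi lst l' r' := by
  intro k hk hk'; exact h k (by omega) (by omega)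

theorem APi_vac {lst : List Int} {l r : Int} (h : r ≤ l + 2) : APi lst l r := by
  intro k hk hk'; omega

theorem length_slice_eq (lst : List Int) {l r : Int} (h0 : 0 ≤ l) (hlr : l ≤ r)
    (hr : r ≤ (lst.length : Int)) :
    ((PySem.List.slice lst (some l) (some r)).length : Int) = r - l := by
  rw [PySem.List.length_slice]; simp only [PySem.List.clampIdx]; split_ifs <;> omega

theorem gI_slice (lst : List Int) {l r i : Int} (h0 : 0 ≤ l) (hi : 0 ≤ i)
    (hir : l + i < r) (hr : r ≤ (lst.length : Int)) :
    gI (PySem.List.slice lst (some l) (some r)) i = gI lst (l + i) := by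
  have hlen := length_slice_eq lst h0 (by omega) hr
  unfold gI
  rw [PySem.List.slice_toNat _ h0 (by omega)] at hlen ⊢
  rw [PySem.List.pyGetD_eq_getElem _ _ hi (by omega),
      PySem.List.pyGetD_eq_getElem _ _ (by omega) (by omega)]
  simp only [List.getElem_take, List.getElem_drop]
  congr 1
  omega

theorem prog_iff (xs : List Int) :
    (get_progresie_aritmetica xs == 1) = true ↔
      ∀ i : Int, 1 ≤ i → i < (xs.length : Int) - 1 →
        2 * gI xs i = gI xs (i-1) + gI xs (i+1) := by
  unfold get_progresie_aritmetica
  by_cases hall : (PySem.List.pyRange 1 ((xs.length : Int)-1) 1).all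
      (fun i => 2 * PySem.List.pyGetD xs i 0
                  == PySem.List.pyGetD xs (i-1) 0 + PySem.List.pyGetD xs (i+1) 0) = true
  · simp only [hall, if_true]
    rw [List.all_eq_true] at hall
    simp only [beq_self_eq_true, true_iff]
    intro i h1 h2
    have := hall i (by rw [PySem.List.mem_pyRange_one]; omega)
    unfold gI
    exact eq_of_beq this
  · have hall' := hall
    rw [List.all_eq_true] at hall'
    push Not at hall'
    rw [if_neg hall]
    constructor
    · intro h; exact absurd h (by decide)
    · intro h
      exfalso
      obtain ⟨i, hmem, hne⟩ := hall'
      rw [PySem.List.mem_pyRange_one] at hmem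
      have := h i (by omega) (by omega)
      unfold gI at this
      simp [this] at hne

theorem prog_eq_one_iff (lst : List Int) {l r : Int} (h0 : 0 ≤ l) (hlr : l ≤ r)
    (hr : r ≤ (lst.length : Int)) :
    (get_progresie_aritmetica (PySem.List.slice lst (some l) (some r)) == 1) = true ↔ APi lst l r := by
  have hlen := length_slice_eq lst h0 hlr hr
  rw [prog_iff]
  constructor
  · intro h k hk hk'
    have := h (k - l) (by omega) (by omega)
    rw [gI_slice lst h0 (by omega) (by omega) hr, gI_slice lst h0 (by omega) (by omega) hr,
        gI_slice lst h0 (by omega) (by omega) hr] at this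
    unfold dd
    have e1 : l + (k - l) = k := by omega
    have e2 : l + (k - l - 1) = k - 1 := by omega
    have e3 : l + (k - l + 1) = k + 1 := by omega
    rw [e1, e2, e3] at this
    have e4 : k - 1 + 1 = k := by omega
    rw [e4]
    omega
  · intro h i hi1 hi2
    rw [hlen] at hi2
    have := h (l + i) (by omega) (by omega)
    unfold dd at this
    rw [gI_slice lst h0 (by omega) (by omega) hr, gI_slice lst h0 (by omega) (by omega) hr,
        gI_slice lst h0 (by omega) (by omega) hr]
    have e2 : l + (i - 1) = l + i - 1 := by omega
    have e3 : l + (i + 1) = l + i + 1 := by omega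
    rw [e2, e3]
    have e4 : l + i - 1 + 1 = l + i := by omega
    rw [e4] at this
    omega

-- the collected list of A, in flatMap form
def listaOf (lst : List Int) : List (List Int) :=
  (PySem.List.pyRange 0 ((lst.length : Int)-2) 1).flatMap (fun left =>
    ((PySem.List.pyRange (left+3) ((lst.length : Int)+1) 1).filter
        (fun right => get_progresie_aritmetica (PySem.List.slice lst (some left) (some right)) == 1)).map
      (fun right => PySem.List.slice lst (some left) (some right)))

theorem lista_eq (lst : List Int) :
    (PySem.List.pyRange 0 ((lst.length : Int)-2) 1).foldl (fun lista left =>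
      (PySem.List.pyRange (left+3) ((lst.length : Int)+1) 1).foldl (fun lista right =>
        if get_progresie_aritmetica (PySem.List.slice lst (some left) (some right)) == 1
        then lista ++ [PySem.List.slice lst (some left) (some right)]
        else lista) lista) [] = listaOf lst := by
  have h1 : ∀ (acc : List (List Int)) (left : Int),
      (PySem.List.pyRange (left+3) ((lst.length : Int)+1) 1).foldl (fun lista right =>
        if get_progresie_aritmetica (PySem.List.slice lst (some left) (some right)) == 1
        then lista ++ [PySem.List.slice lst (some left) (some right)]
        else lista) acc
      = acc ++ ((PySem.List.pyRange (left+3) ((lst.length : Int)+1) 1).filter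
          (fun right => get_progresie_aritmetica (PySem.List.slice lst (some left) (some right)) == 1)).map
          (fun right => PySem.List.slice lst (some left) (some right)) := by
    intro acc left
    exact PySem.List.foldl_append_if _ _ _ _
  calc (PySem.List.pyRange 0 ((lst.length : Int)-2) 1).foldl (fun lista left =>
      (PySem.List.pyRange (left+3) ((lst.length : Int)+1) 1).foldl (fun lista right =>
        if get_progresie_aritmetica (PySem.List.slice lst (some left) (some right)) == 1
        then lista ++ [PySem.List.slice lst (some left) (some right)]
        else lista) lista) []
      = (PySem.List.pyRange 0 ((lst.length : Int)-2) 1).foldl (fun lista left =>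
          lista ++ ((PySem.List.pyRange (left+3) ((lst.length : Int)+1) 1).filter
            (fun right => get_progresie_aritmetica (PySem.List.slice lst (some left) (some right)) == 1)).map
            (fun right => PySem.List.slice lst (some left) (some right))) [] := by
        exact PySem.List.foldl_congr_mem _ _ _ _ (fun acc x _ => h1 acc x)
    _ = listaOf lst := by
        rw [PySem.List.foldl_append_eq_flatMap]
        rfl

theorem mem_lista (lst : List Int) {z : List Int} (hz : z ∈ listaOf lst) :
    ∃ l r : Int, 0 ≤ l ∧ l + 3 ≤ r ∧ r ≤ (lst.length : Int) ∧ APi lst l r ∧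
      z = PySem.List.slice lst (some l) (some r) := by
  unfold listaOf at hz
  simp only [List.mem_flatMap, List.mem_map, List.mem_filter, PySem.List.mem_pyRange_one] at hz
  obtain ⟨l, ⟨hl0, hln⟩, r, ⟨⟨hr1, hr2⟩, hap⟩, hzs⟩ := hz
  exact ⟨l, r, hl0, by omega, by omega, (prog_eq_one_iff lst hl0 (by omega) (by omega)).mp hap, hzs.symm⟩

-- the selection loop of A: keeps the first element of maximal length
theorem sel_mem (xs : List (List Int)) (acc : List Int) :
    xs.foldl (fun result num => if result.length < num.length then num else result) acc = acc ∨
    xs.foldl (fun result num => if result.length < num.length then num else result) acc ∈ xs := by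
  induction xs generalizing acc with
  | nil => simp
  | cons x t ih =>
    simp only [List.foldl_cons]
    rcases ih (if acc.length < x.length then x else acc) with h | h
    · rw [h]
      split
      · right; exact List.mem_cons_self
      · left; rfl
    · right; exact List.mem_cons_of_mem _ h

theorem sel_stay (xs : List (List Int)) (acc : List Int)
    (h : ∀ z ∈ xs, z.length ≤ acc.length) :
    xs.foldl (fun result num => if result.length < num.length then num else result) acc = acc := by
  induction xs generalizing acc with
  | nil => simp
  | cons x t ih =>
    simp only [List.foldl_cons]
    rw [if_neg (by have := h x List.mem_cons_self; omega)]
    exact ih _ (fun z hz => h z (List.mem_cons_of_mem _ hz))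

theorem sel_split (xs₁ xs₂ : List (List Int)) (y acc : List Int)
    (h1 : ∀ z ∈ xs₁, z.length < y.length) (hacc : acc.length < y.length)
    (h2 : ∀ z ∈ xs₂, z.length ≤ y.length) :
    (xs₁ ++ y :: xs₂).foldl (fun result num => if result.length < num.length then num else result) acc = y := by
  rw [List.foldl_append]
  have hacc' : (xs₁.foldl (fun result num => if result.length < num.length then num else result) acc).length < y.length := by
    rcases sel_mem xs₁ acc with h | h
    · rw [h]; exact hacc
    · exact h1 _ h
  simp only [List.foldl_cons]
  rw [if_pos hacc']
  exact sel_stay xs₂ y h2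

-- B's loop invariant after processing indices 1..j
def BInv (lst : List Int) (j : Int) (st : (Int × Int) × Int) : Prop :=
  (0 ≤ st.2 ∧ st.2 ≤ j ∧ APi lst st.2 (j+1) ∧ (∀ s, 0 ≤ s → s < st.2 → ¬ APi lst s (j+1)))
  ∧ ((st.1.2 = 0 ∧ st.1.1 = 0 ∧ ∀ l L : Int, 0 ≤ l → 3 ≤ L → l + L ≤ j+1 → ¬ APi lst l (l+L))
     ∨ (3 ≤ st.1.2 ∧ 0 ≤ st.1.1 ∧ st.1.1 + st.1.2 ≤ j+1 ∧ APi lst st.1.1 (st.1.1+st.1.2)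
        ∧ (∀ l L : Int, 0 ≤ l → 3 ≤ L → l + L ≤ j+1 → APi lst l (l+L) → L ≤ st.1.2)
        ∧ (∀ l : Int, 0 ≤ l → l < st.1.1 → ¬ APi lst l (l + st.1.2))))

def bstep (lst : List Int) (st : (Int × Int) × Int) (i : Int) : (Int × Int) × Int :=
  let run_start : Int :=
    if 2 ≤ i ∧ PySem.List.pyGetD lst i 0 - PySem.List.pyGetD lst (i-1) 0
               ≠ PySem.List.pyGetD lst (i-1) 0 - PySem.List.pyGetD lst (i-2) 0
    then i - 1 else st.2
  let cur_len : Int := i - run_start + 1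
  let best : Int × Int :=
    if 3 ≤ cur_len ∧ st.1.2 < cur_len then (run_start, cur_len) else st.1
  (best, run_start)

theorem APi_succ_iff (lst : List Int) (s j : Int) :
    APi lst s (j+2) ↔ APi lst s (j+1) ∧ (s < j → dd lst (j-1) = dd lst j) := by
  constructor
  · intro h
    refine ⟨APi_mono h le_rfl (by omega), fun hs => ?_⟩
    have := h j hs (by omega)
    rwa [show j - 1 = j - 1 from rfl] at this
  · rintro ⟨h1, h2⟩ k hk hk'
    by_cases hkj : k = j
    · subst hkj; exact h2 hk
    · exact h1 k hk (by omega)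

theorem bstep_inv (lst : List Int) (j : Int) (st : (Int × Int) × Int)
    (h0 : 0 ≤ j) (hinv : BInv lst j st) : BInv lst (j+1) (bstep lst st (j+1)) := by
  obtain ⟨⟨hrs0, hrsj, hrsAP, hrsMin⟩, hbest⟩ := hinv
  have hsucc : ∀ s : Int, APi lst s (j+1+1) ↔ APi lst s (j+1) ∧ (s < j → dd lst (j-1) = dd lst j) := by
    intro s
    rw [show j+1+1 = j+2 by ring]
    exact APi_succ_iff lst s j
  unfold BInv
  simp only [bstep]
  by_cases hc : 2 ≤ j+1 ∧ PySem.List.pyGetD lst (j+1) 0 - PySem.List.pyGetD lst (j+1-1) 0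
                     ≠ PySem.List.pyGetD lst (j+1-1) 0 - PySem.List.pyGetD lst (j+1-2) 0
  · -- the difference breaks at index j+1: the run restarts at j
    rw [if_pos hc]
    have hcd : dd lst (j-1) ≠ dd lst j := by
      obtain ⟨hc1, hc2⟩ := hc
      unfold dd gI
      rw [show j-1+1 = j by ring]
      intro he
      apply hc2
      rw [show (j:Int)+1-1 = j by ring, show (j:Int)+1-2 = j-1 by ring]
      omega
    have hj1 : 1 ≤ j := by omega
    have hrs' : APi lst j (j+1+1) := APi_vac (by omega)
    have hmin' : ∀ s : Int, 0 ≤ s → s < j → ¬ APi lst s (j+1+1) := by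
      intro s hs0 hsj hap
      exact hcd (((hsucc s).mp hap).2 hsj)
    -- cur = (j+1) - (j+1-1) + 1 = 2, so the best never updates here
    have hcur : j + 1 - (j + 1 - 1) + 1 = 2 := by ring
    rw [hcur]
    rw [if_neg (by omega)]
    refine ⟨⟨by omega, by omega, by rw [show (j:Int)+1-1 = j by ring]; exact hrs', ?_⟩, ?_⟩
    · intro s hs0 hs
      rw [show (j:Int)+1-1 = j by ring] at hs
      exact hmin' s hs0 hs
    · rcases hbest with ⟨hbl0, hbs0, hnone⟩ | ⟨hbl3, hbs0, hble, hAPb, hmax, hmin⟩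
      · left
        refine ⟨hbl0, hbs0, ?_⟩
        intro l L hl0 hL3 hle hap
        by_cases hcase : l + L ≤ j + 1
        · exact hnone l L hl0 hL3 hcase hap
        · have hlL : l + L = j + 2 := by omega
          have hap' : APi lst l (j+1+1) := by rw [show j+1+1 = j+2 by ring, ← hlL]; exact hap
          have : ¬ l < j := fun hlj => hmin' l hl0 hlj hap'
          omega
      · right
        refine ⟨hbl3, hbs0, by omega, hAPb, ?_, hmin⟩
        intro l L hl0 hL3 hle hap
        by_cases hcase : l + L ≤ j + 1
        · exact hmax l L hl0 hL3 hcase hap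
        · have hlL : l + L = j + 2 := by omega
          have hap' : APi lst l (j+1+1) := by rw [show j+1+1 = j+2 by ring, ← hlL]; exact hap
          have : ¬ l < j := fun hlj => hmin' l hl0 hlj hap'
          omega
  · -- no break: the run continues
    rw [if_neg hc]
    have hcd : j = 0 ∨ dd lst (j-1) = dd lst j := by
      by_cases hj : j = 0
      · exact Or.inl hj
      · right
        by_contra hne
        apply hc
        refine ⟨by omega, ?_⟩
        unfold dd gI at hne
        rw [show j-1+1 = j by ring] at hne
        rw [show (j:Int)+1-1 = j by ring, show (j:Int)+1-2 = j-1 by ring]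
        omega
    have hrs' : APi lst st.2 (j+1+1) := by
      rw [hsucc]
      refine ⟨hrsAP, fun hlt => ?_⟩
      rcases hcd with h | h
      · omega
      · exact h
    have hmin' : ∀ s : Int, 0 ≤ s → s < st.2 → ¬ APi lst s (j+1+1) := by
      intro s hs0 hs hap
      exact hrsMin s hs0 hs ((hsucc s).mp hap).1
    have hNew : ∀ l L : Int, 0 ≤ l → l + L = j + 2 → APi lst l (l+L) → st.2 ≤ l := by
      intro l L hl0 hlL hap
      by_contra hlt
      exact hmin' l hl0 (by omega) (by rw [show j+1+1 = j+2 by ring, ← hlL]; exact hap)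
    by_cases hb : 3 ≤ j + 1 - st.2 + 1 ∧ st.1.2 < j + 1 - st.2 + 1
    · rw [if_pos hb]
      dsimp only
      refine ⟨⟨hrs0, by omega, hrs', hmin'⟩, ?_⟩
      right
      have hcur3 : 3 ≤ j + 1 - st.2 + 1 := hb.1
      refine ⟨hcur3, hrs0, by omega, ?_, ?_, ?_⟩
      · rw [show st.2 + (j + 1 - st.2 + 1) = j+1+1 by ring]; exact hrs'
      · intro l L hl0 hL3 hle hap
        by_cases hcase : l + L ≤ j + 1
        · rcases hbest with ⟨hbl0, hbs0, hnone⟩ | ⟨hbl3, hbs0, hble, hAPb, hmax, hmin⟩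
          · exact absurd hap (hnone l L hl0 hL3 hcase)
          · have := hmax l L hl0 hL3 hcase hap
            omega
        · have := hNew l L hl0 (by omega) hap
          omega
      · intro l hl0 hl hap
        have hle' : l + (j + 1 - st.2 + 1) ≤ j + 1 := by omega
        rcases hbest with ⟨hbl0, hbs0, hnone⟩ | ⟨hbl3, hbs0, hble, hmaxAP, hmax, hmin⟩
        · exact hnone l _ hl0 hcur3 hle' hap
        · have := hmax l _ hl0 hcur3 hle' hap
          omega
    · rw [if_neg hb]
      refine ⟨⟨hrs0, by omega, hrs', hmin'⟩, ?_⟩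
      rcases hbest with ⟨hbl0, hbs0, hnone⟩ | ⟨hbl3, hbs0, hble, hAPb, hmax, hmin⟩
      · left
        refine ⟨hbl0, hbs0, ?_⟩
        intro l L hl0 hL3 hle hap
        by_cases hcase : l + L ≤ j + 1
        · exact hnone l L hl0 hL3 hcase hap
        · have h1 := hNew l L hl0 (by omega) hap
          rw [hbl0] at hb
          omega
      · right
        refine ⟨hbl3, hbs0, by omega, hAPb, ?_, hmin⟩
        intro l L hl0 hL3 hle hap
        by_cases hcase : l + L ≤ j + 1
        · exact hmax l L hl0 hL3 hcase hap
        · have h1 := hNew l L hl0 (by omega) hap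
          omega

theorem b_inv (lst : List Int) (j : Nat) :
    BInv lst (j : Int) ((PySem.List.pyRange 1 ((j : Int)+1) 1).foldl (bstep lst) ((0,0),0)) := by
  induction j with
  | zero =>
    rw [PySem.List.pyRange_one_eq_nil (by omega)]
    simp only [List.foldl_nil]
    exact ⟨⟨le_rfl, by omega, APi_vac (by omega), fun s hs0 hs => absurd hs (by omega)⟩,
      Or.inl ⟨rfl, rfl, fun l L hl0 hL3 hle => absurd hL3 (by omega)⟩⟩
  | succ k ih =>
    have hcast : (((k+1 : Nat)) : Int) = (k : Int) + 1 := by push_cast; ring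
    rw [hcast]
    rw [PySem.List.pyRange_one_succ_right (by omega)]
    rw [List.foldl_append]
    simp only [List.foldl_cons, List.foldl_nil]
    exact bstep_inv lst (k : Int) _ (by omega) ih

theorem mem_piece (lst : List Int) {z : List Int} {a b : Int} (ha : 0 ≤ a)
    (hz : z ∈ (PySem.List.pyRange a b 1).flatMap (fun left =>
      ((PySem.List.pyRange (left+3) ((lst.length : Int)+1) 1).filter
        (fun right => get_progresie_aritmetica (PySem.List.slice lst (some left) (some right)) == 1)).map
        (fun right => PySem.List.slice lst (some left) (some right)))) :
    ∃ l r : Int, a ≤ l ∧ l < b ∧ l + 3 ≤ r ∧ r ≤ (lst.length : Int) ∧ APi lst l r ∧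
      z = PySem.List.slice lst (some l) (some r) := by
  simp only [List.mem_flatMap, List.mem_map, List.mem_filter, PySem.List.mem_pyRange_one] at hz
  obtain ⟨l, ⟨hl1, hl2⟩, r, ⟨⟨hr1, hr2⟩, hap⟩, hzs⟩ := hz
  exact ⟨l, r, hl1, hl2, hr1, by omega,
    (prog_eq_one_iff lst (by omega) (by omega) (by omega)).mp hap, hzs.symm⟩

theorem mem_filter_piece (lst : List Int) {z : List Int} {left lo hi : Int}
    (h0 : 0 ≤ left) (hlo : left ≤ lo) (hhi : hi ≤ (lst.length : Int)+1)
    (hz : z ∈ ((PySem.List.pyRange lo hi 1).filter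
        (fun right => get_progresie_aritmetica (PySem.List.slice lst (some left) (some right)) == 1)).map
        (fun right => PySem.List.slice lst (some left) (some right))) :
    ∃ r : Int, lo ≤ r ∧ r < hi ∧ APi lst left r ∧
      z = PySem.List.slice lst (some left) (some r) := by
  simp only [List.mem_map, List.mem_filter, PySem.List.mem_pyRange_one] at hz
  obtain ⟨r, ⟨⟨hr1, hr2⟩, hap⟩, hzs⟩ := hz
  exact ⟨r, hr1, hr2, (prog_eq_one_iff lst h0 (by omega) (by omega)).mp hap, hzs.symm⟩

theorem final_eq (lst : List Int) :
    get_longest_arithmetic_progression lst = get_longest_arithmetic_progression_alt lst := by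
  by_cases hnil : lst = []
  · subst hnil; rfl
  · have hn1 : 1 ≤ lst.length := List.length_pos_iff.mpr hnil
    have hj : (((lst.length - 1 : Nat)) : Int) + 1 = (lst.length : Int) := by omega
    have hinv := b_inv lst (lst.length - 1)
    unfold BInv at hinv
    rw [hj] at hinv
    have hA : get_longest_arithmetic_progression lst
        = (listaOf lst).foldl (fun result num => if result.length < num.length then num else result) [] := by
      simp only [get_longest_arithmetic_progression]
      rw [lista_eq]
    have hB : get_longest_arithmetic_progression_alt lst
        = PySem.List.slice lst
            (some ((PySem.List.pyRange 1 ((lst.length : Int)) 1).foldl (bstep lst) ((0,0),0)).1.1)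
            (some (((PySem.List.pyRange 1 ((lst.length : Int)) 1).foldl (bstep lst) ((0,0),0)).1.1
                 + ((PySem.List.pyRange 1 ((lst.length : Int)) 1).foldl (bstep lst) ((0,0),0)).1.2)) := rfl
    obtain ⟨⟨hrs0, hrsj, hrsAP, hrsMin⟩, hbest⟩ := hinv
    rcases hbest with ⟨hbl0, hbs0, hnone⟩ | ⟨hbl3, hbs0, hble, hAPb, hmax, hmin⟩
    · -- no arithmetic subarray of length ≥ 3 anywhere: both return []
      have hempty : listaOf lst = [] := by
        rw [List.eq_nil_iff_forall_not_mem]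
        intro z hz
        obtain ⟨l, r, hl0, hr3, hrn, hap, hzeq⟩ := mem_lista lst hz
        exact hnone l (r - l) hl0 (by omega) (by omega)
          (by rw [show l + (r - l) = r by ring]; exact hap)
      rw [hA, hempty, hB, hbl0, hbs0]
      simp only [List.foldl_nil]
      rw [show (0 : Int) + 0 = 0 by ring]
      rw [PySem.List.slice_toNat _ le_rfl le_rfl]
      simp
    · -- there is one: both return the leftmost longest
      set bs := ((PySem.List.pyRange 1 ((lst.length : Int)) 1).foldl (bstep lst) ((0,0),0)).1.1 with hbsdef
      set bl := ((PySem.List.pyRange 1 ((lst.length : Int)) 1).foldl (bstep lst) ((0,0),0)).1.2 with hbldef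
      have hylen : ((PySem.List.slice lst (some bs) (some (bs+bl))).length : Int) = bl := by
        rw [length_slice_eq lst hbs0 (by omega) (by omega)]; ring
      have hsplit : ∃ X1 X2 : List (List Int),
          listaOf lst = X1 ++ PySem.List.slice lst (some bs) (some (bs+bl)) :: X2 ∧
          (∀ z ∈ X1, (z.length : Int) < bl) ∧ (∀ z ∈ X2, (z.length : Int) ≤ bl) := by
        have hcond : (get_progresie_aritmetica (PySem.List.slice lst (some bs) (some (bs+bl))) == 1) = true :=
          (prog_eq_one_iff lst hbs0 (by omega) (by omega)).mpr hAPb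
        refine ⟨(PySem.List.pyRange 0 bs 1).flatMap (fun left =>
            ((PySem.List.pyRange (left+3) ((lst.length : Int)+1) 1).filter
              (fun right => get_progresie_aritmetica (PySem.List.slice lst (some left) (some right)) == 1)).map
              (fun right => PySem.List.slice lst (some left) (some right)))
          ++ ((PySem.List.pyRange (bs+3) (bs+bl) 1).filter
              (fun right => get_progresie_aritmetica (PySem.List.slice lst (some bs) (some right)) == 1)).map
              (fun right => PySem.List.slice lst (some bs) (some right)),
          ((PySem.List.pyRange (bs+bl+1) ((lst.length : Int)+1) 1).filter
              (fun right => get_progresie_aritmetica (PySem.List.slice lst (some bs) (some right)) == 1)).map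
              (fun right => PySem.List.slice lst (some bs) (some right))
          ++ (PySem.List.pyRange (bs+1) ((lst.length : Int)-2) 1).flatMap (fun left =>
            ((PySem.List.pyRange (left+3) ((lst.length : Int)+1) 1).filter
              (fun right => get_progresie_aritmetica (PySem.List.slice lst (some left) (some right)) == 1)).map
              (fun right => PySem.List.slice lst (some left) (some right))), ?_, ?_, ?_⟩
        · unfold listaOf
          rw [PySem.List.pyRange_one_append 0 bs ((lst.length : Int)-2) hbs0 (by omega)]
          rw [PySem.List.pyRange_one_append bs (bs+1) ((lst.length : Int)-2) (by omega) (by omega)]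
          rw [PySem.List.pyRange_one_singleton]
          rw [List.flatMap_append, List.flatMap_append]
          simp only [List.flatMap_cons, List.flatMap_nil, List.append_nil]
          rw [PySem.List.pyRange_one_append (bs+3) (bs+bl) ((lst.length : Int)+1) (by omega) (by omega)]
          rw [PySem.List.pyRange_one_append (bs+bl) (bs+bl+1) ((lst.length : Int)+1) (by omega) (by omega)]
          rw [PySem.List.pyRange_one_singleton]
          rw [List.filter_append, List.filter_append, List.map_append, List.map_append]
          rw [List.filter_singleton, hcond]
          simp only [cond_true, List.map_cons, List.map_nil, List.append_assoc, List.cons_append,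
            List.nil_append]
        · intro z hz
          rcases List.mem_append.mp hz with hz1 | hz2
          · obtain ⟨l, r, hl1, hl2, hr1, hr2, hap, hzeq⟩ := mem_piece lst le_rfl hz1
            have hLle : r - l ≤ bl := hmax l (r - l) (by omega) (by omega) (by omega)
              (by rw [show l + (r - l) = r by ring]; exact hap)
            have hLne : r - l ≠ bl := by
              intro he
              exact hmin l (by omega) (by omega)
                (by rw [show l + bl = r by omega]; exact hap)
            rw [hzeq, length_slice_eq lst (by omega) (by omega) (by omega)]
            omega
          · obtain ⟨r, hr1, hr2, hap, hzeq⟩ := mem_filter_piece lst hbs0 (by omega) (by omega) hz2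
            rw [hzeq, length_slice_eq lst hbs0 (by omega) (by omega)]
            omega
        · intro z hz
          rcases List.mem_append.mp hz with hz1 | hz2
          · obtain ⟨r, hr1, hr2, hap, hzeq⟩ := mem_filter_piece lst hbs0 (by omega) le_rfl hz1
            have hLle : r - bs ≤ bl := hmax bs (r - bs) hbs0 (by omega) (by omega)
              (by rw [show bs + (r - bs) = r by ring]; exact hap)
            rw [hzeq, length_slice_eq lst hbs0 (by omega) (by omega)]
            omega
          · obtain ⟨l, r, hl1, hl2, hr1, hr2, hap, hzeq⟩ := mem_piece lst (by omega) hz2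
            have hLle : r - l ≤ bl := hmax l (r - l) (by omega) (by omega) (by omega)
              (by rw [show l + (r - l) = r by ring]; exact hap)
            rw [hzeq, length_slice_eq lst (by omega) (by omega) (by omega)]
            omega
      obtain ⟨X1, X2, hs, h1, h2⟩ := hsplit
      rw [hA, hs, hB]
      apply sel_split
      · intro z hz
        have := h1 z hz
        omega
      · simp only [List.length_nil]
        omega
      · intro z hz
        have := h2 z hz
        omega

-- ===== VERDICT (by name: the statement is the Claim_ definition above) =====
theorem get_longest_arithmetic_progression_spec : Claim_equal_get_longest_arithmetic_progression := by
  intro lst _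
  unfold Spec_get_longest_arithmetic_progression
  exact final_eq lst
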